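-- pv_equiv track=rewrite | github.com/RupenParthu/gesture-steering-control | hand/tracking.py | get_finger_tips
-- ===== SOURCE A (Python) =====
-- def get_finger_tips(landmarks):
--     # Get specific landmark tips for each finger
--     finger_tip_ids = {
--         "thumb": 4,
--         "index": 8,
--         "middle": 12,
--         "ring": 16,
--         "pinky": 20
--     }
--
--     finger_positions = {}
--     for name, idx in finger_tip_ids.items():
--         for id, x, y in landmarks:
--             if id == idx:
--                 finger_positions[name] = (x, y)
--                 break
--
--     return finger_positions
-- ===== SOURCE B (Python) =====
-- def get_finger_tips(landmarks):
--     finger_tip_ids = {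
--         "thumb": 4,
--         "index": 8,
--         "middle": 12,
--         "ring": 16,
--         "pinky": 20
--     }
--     index = {}
--     for id, x, y in landmarks:
--         if id not in index:
--             index[id] = (x, y)
--     return {name: index[i] for name, i in finger_tip_ids.items() if i in index}
-- ===== Notes on version B (the rewrite author's own statement) =====
-- stated objective: idiomatic
-- what changed: Replaces the per-finger rescans of the landmark list with a single-pass first-occurrence-wins index dict plus a dict comprehension over the fixed finger-name table.
import Mathlib
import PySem

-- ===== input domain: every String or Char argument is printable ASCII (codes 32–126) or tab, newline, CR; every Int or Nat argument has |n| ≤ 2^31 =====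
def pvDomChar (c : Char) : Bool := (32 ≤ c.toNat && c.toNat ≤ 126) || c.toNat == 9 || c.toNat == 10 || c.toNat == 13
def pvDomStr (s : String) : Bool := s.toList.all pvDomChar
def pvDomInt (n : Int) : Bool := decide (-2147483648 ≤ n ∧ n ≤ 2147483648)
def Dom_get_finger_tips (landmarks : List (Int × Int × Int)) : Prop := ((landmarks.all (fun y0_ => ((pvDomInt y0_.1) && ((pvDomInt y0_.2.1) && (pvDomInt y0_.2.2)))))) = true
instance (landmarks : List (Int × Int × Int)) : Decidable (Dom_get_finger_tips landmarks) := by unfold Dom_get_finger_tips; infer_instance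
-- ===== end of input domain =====

-- B builds a first-occurrence index of the landmarks in one pass and looks each finger id up in it,
-- instead of rescanning the landmark list once per finger (objective: idiomatic single-pass index).


-- the fixed name → landmark-id table, shared by both Pythons
def pvFingerTipIds : List (String × Int) :=
  [("thumb", 4), ("index", 8), ("middle", 12), ("ring", 16), ("pinky", 20)]

-- ===== PORT A =====
-- inner 'for id, x, y in landmarks: if id == idx: …; break' of A: first matching landmark
def pvScanA (idx : Int) : List (Int × Int × Int) → Option (Int × Int)
  | [] => none
  | (id, x, y) :: rest => if id = idx then some (x, y) else pvScanA idx rest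

def get_finger_tips (landmarks : List (Int × Int × Int)) : List (String × Int × Int) :=
  (pvFingerTipIds.foldl (fun d p =>
      match pvScanA p.2 landmarks with
      | some xy => d.insert p.1 xy
      | none => d) (PySem.Dict.empty : PySem.Dict String (Int × Int))).items

-- ===== PORT B =====
-- 'for id, x, y in landmarks: if id not in index: index[id] = (x, y)'
def pvBuildIndex (landmarks : List (Int × Int × Int)) : PySem.Dict Int (Int × Int) :=
  landmarks.foldl (fun d p => if d.contains p.1 then d else d.insert p.1 (p.2.1, p.2.2))
    PySem.Dict.empty

-- dict comprehension over the (distinct) finger names, keeping the ids present in the index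
def get_finger_tips_alt (landmarks : List (Int × Int × Int)) : List (String × Int × Int) :=
  let index := pvBuildIndex landmarks
  pvFingerTipIds.filterMap (fun p => (index.get? p.2).map (fun xy => (p.1, xy)))

-- ===== PRECONDITION & SPEC =====
def Spec_get_finger_tips (landmarks : List (Int × Int × Int)) (out : List (String × Int × Int)) : Prop := out = get_finger_tips_alt landmarks
instance (landmarks : List (Int × Int × Int)) (out : List (String × Int × Int)) : Decidable (Spec_get_finger_tips landmarks out) := by unfold Spec_get_finger_tips; infer_instance

-- ===== CLAIM (what is proved, stated in full; the proofs are below) =====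
def Claim_equal_get_finger_tips : Prop := ∀ (landmarks : List (Int × Int × Int)), Dom_get_finger_tips landmarks → Spec_get_finger_tips landmarks (get_finger_tips landmarks)

-- ===== LEMMAS AND PROOFS =====

-- the first-occurrence-wins index answers lookups exactly like A's first-match scan
theorem pv_index_get (l : List (Int × Int × Int)) (d : PySem.Dict Int (Int × Int)) (i : Int) :
    (l.foldl (fun d p => if d.contains p.1 then d else d.insert p.1 (p.2.1, p.2.2)) d).get? i
      = (d.get? i).or (pvScanA i l) := by
  induction l generalizing d with
  | nil => simp [pvScanA]
  | cons p rest ih =>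
    obtain ⟨id, x, y⟩ := p
    simp only [List.foldl_cons, pvScanA]
    by_cases hc : d.contains id
    · rw [if_pos hc, ih]
      by_cases hi : id = i
      · subst hi
        have : ∃ v, d.get? id = some v := by
          rcases h : d.get? id with _ | v
          · rw [PySem.Dict.contains_eq_isSome_get?, h] at hc; simp at hc
          · exact ⟨v, rfl⟩
        obtain ⟨v, hv⟩ := this
        simp [hv]
      · simp [hi]
    · rw [if_neg hc, ih, PySem.Dict.get?_insert]
      by_cases hi : i = id
      · subst hi
        have hnone : d.get? i = none := by
          rcases h : d.get? i with _ | v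
          · rfl
          · rw [PySem.Dict.contains_eq_isSome_get?, h] at hc; simp at hc
        simp [hnone]
      · have hi' : ¬ id = i := fun h => hi h.symm
        simp [hi, hi']

theorem pv_buildIndex_get (landmarks : List (Int × Int × Int)) (i : Int) :
    (pvBuildIndex landmarks).get? i = pvScanA i landmarks := by
  unfold pvBuildIndex
  rw [pv_index_get]
  simp

-- A's fold over fresh distinct keys produces exactly the filterMap of the scans
theorem pv_fold_items (f : Int → Option (Int × Int)) (tips : List (String × Int))
    (d : PySem.Dict String (Int × Int))
    (hn : (tips.map (·.1)).Nodup) (hf : ∀ p ∈ tips, d.contains p.1 = false) :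
    (tips.foldl (fun d p =>
        match f p.2 with
        | some xy => d.insert p.1 xy
        | none => d) d).items
      = d.items ++ tips.filterMap (fun p => (f p.2).map (fun xy => (p.1, xy))) := by
  induction tips generalizing d with
  | nil => simp
  | cons p rest ih =>
    obtain ⟨n, i⟩ := p
    simp only [List.map_cons, List.nodup_cons] at hn
    rcases h : f i with _ | xy
    · simp only [List.foldl_cons, h]
      rw [ih d hn.2 (fun q hq => hf q (List.mem_cons_of_mem _ hq))]
      simp [h]
    · simp only [List.foldl_cons, h]
      have hd : d.contains n = false := hf (n, i) (List.mem_cons_self ..)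
      have hrest : ∀ q ∈ rest, (d.insert n xy).contains q.1 = false := by
        intro q hq
        rw [PySem.Dict.contains_insert]
        have hne : q.1 ≠ n := by
          intro he
          exact hn.1 (he ▸ List.mem_map_of_mem hq)
        simp [hne, hf q (List.mem_cons_of_mem _ hq)]
      rw [ih (d.insert n xy) hn.2 hrest,
          PySem.Dict.items_insert_of_not_contains d xy hd]
      simp [h]

-- ===== VERDICT (by name: the statement is the Claim_ definition above) =====
theorem get_finger_tips_spec : Claim_equal_get_finger_tips := by
  intro landmarks _
  unfold Spec_get_finger_tips get_finger_tips get_finger_tips_alt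
  rw [pv_fold_items (fun i => pvScanA i landmarks) pvFingerTipIds PySem.Dict.empty
        (by decide) (by intro p _; simp)]
  simp [pv_buildIndex_get, PySem.Dict.empty]
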